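-- pv_equiv track=rewrite | github.com/LucasConde22/TPs-TDA | Guías/1P/19-12-24/1.py | colocar_guardias
-- ===== SOURCE A (Python) =====
-- def colocar_guardias(n, m):
--     guardias = []
--     suelo = suelo = [[False] * m for _ in range(n)]
--
--     for fil in range(len(suelo)):
--         for col in range(len(suelo[0])):
--             arr = suelo[fil - 1][col] if fil > 0 else False
--             arr_izq = suelo[fil - 1][col - 1] if fil > 0 and col > 0 else False
--             arr_der = suelo[fil - 1][col + 1] if fil > 0 and col < len(suelo[0]) - 1 else False
--             izq = suelo[fil][col - 1] if col > 0 else False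
--             der = suelo[fil][col + 1] if col < len(suelo[0]) - 1 else False
--             ab = suelo[fil + 1][col] if fil < len(suelo) - 1 else False
--             ab_izq = suelo[fil + 1][col - 1] if fil < len(suelo) - 1 and col > 0 else False
--             ab_der = suelo[fil + 1][col + 1] if fil < len(suelo) - 1 and col < len(suelo[0]) - 1 else False
--
--             if arr or arr_izq or arr_der or izq or der or ab or ab_izq or ab_der:
--                 continue
--             else:
--                 suelo[fil][col] = True
--                 guardias.append((fil, col))
--
--     return guardias
-- ===== SOURCE B (Python) =====
-- def colocar_guardias(n, m):
--     # A guard at every cell with both coordinates even covers the grid and is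
--     # exactly what the row-major greedy 8-neighbour scan produces: emit it directly.
--     return [(i, j) for i in range(0, n, 2) for j in range(0, m, 2)]
-- ===== Notes on version B (the rewrite author's own statement) =====
-- stated objective: faster
-- what changed: B emits the even-even lattice points directly with two stride-2 ranges instead of simulating the greedy scan over an n*m boolean grid with 8 neighbour lookups per cell.
import Mathlib
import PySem

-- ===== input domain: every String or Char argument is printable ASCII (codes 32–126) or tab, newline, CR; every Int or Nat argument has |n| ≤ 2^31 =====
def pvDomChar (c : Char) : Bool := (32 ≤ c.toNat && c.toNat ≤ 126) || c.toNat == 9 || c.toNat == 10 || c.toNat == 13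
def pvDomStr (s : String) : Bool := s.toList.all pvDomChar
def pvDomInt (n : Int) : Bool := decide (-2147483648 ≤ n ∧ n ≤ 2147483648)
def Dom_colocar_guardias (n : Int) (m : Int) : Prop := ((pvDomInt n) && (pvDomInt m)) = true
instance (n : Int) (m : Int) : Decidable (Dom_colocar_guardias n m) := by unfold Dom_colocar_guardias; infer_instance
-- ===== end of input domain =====

-- B replaces A's greedy scan over an n×m boolean grid by directly emitting the
-- even-even lattice points with two stride-2 ranges (objective: faster).

-- ===== PORT A =====
-- suelo[i][j]; every read in A is guarded to be in range with a nonnegative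
-- index, so the defaults of pyGetD are never used — exact on all reached states.
def cgCell (g : List (List Bool)) (i j : Int) : Bool :=
  PySem.List.pyGetD (PySem.List.pyGetD g i []) j false

-- one inner-loop body: the 8 neighbour tests, then skip or place
def cgStep (st : List (List Bool) × List (Int × Int)) (fil col : Int) :
    List (List Bool) × List (Int × Int) :=
  let g := st.1
  let nrows : Int := (g.length : Int)
  let rowlen : Int := ((PySem.List.pyGetD g 0 []).length : Int)
  let arr := if fil > 0 then cgCell g (fil - 1) col else false
  let arr_izq := if fil > 0 ∧ col > 0 then cgCell g (fil - 1) (col - 1) else false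
  let arr_der := if fil > 0 ∧ col < rowlen - 1 then cgCell g (fil - 1) (col + 1) else false
  let izq := if col > 0 then cgCell g fil (col - 1) else false
  let der := if col < rowlen - 1 then cgCell g fil (col + 1) else false
  let ab := if fil < nrows - 1 then cgCell g (fil + 1) col else false
  let ab_izq := if fil < nrows - 1 ∧ col > 0 then cgCell g (fil + 1) (col - 1) else false
  let ab_der := if fil < nrows - 1 ∧ col < rowlen - 1 then cgCell g (fil + 1) (col + 1) else false
  if arr || arr_izq || arr_der || izq || der || ab || ab_izq || ab_der then st
  else (PySem.List.pySetD g fil (PySem.List.pySetD (PySem.List.pyGetD g fil []) col true),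
        st.2 ++ [(fil, col)])

def colocar_guardias (n : Int) (m : Int) : List (Int × Int) :=
  -- [[False] * m for _ in range(n)]  ([False]*m is [] for m ≤ 0, hence m.toNat)
  let suelo : List (List Bool) :=
    (PySem.List.pyRange 0 n 1).map (fun _ => List.replicate m.toNat false)
  let res :=
    (PySem.List.pyRange 0 (suelo.length : Int) 1).foldl
      (fun st fil =>
        (PySem.List.pyRange 0 ((PySem.List.pyGetD st.1 0 []).length : Int) 1).foldl
          (fun st2 col => cgStep st2 fil col) st)
      (suelo, ([] : List (Int × Int)))
  res.2

-- ===== PORT B =====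
def colocar_guardias_alt (n : Int) (m : Int) : List (Int × Int) :=
  (PySem.List.pyRange 0 n 2).flatMap
    (fun i => (PySem.List.pyRange 0 m 2).map (fun j => (i, j)))

-- ===== PRECONDITION & SPEC =====
def Spec_colocar_guardias (n : Int) (m : Int) (out : List (Int × Int)) : Prop := out = colocar_guardias_alt n m
instance (n : Int) (m : Int) (out : List (Int × Int)) : Decidable (Spec_colocar_guardias n m out) := by unfold Spec_colocar_guardias; infer_instance

-- ===== CLAIM (what is proved, stated in full; the proofs are below) =====
def Claim_equal_colocar_guardias : Prop := ∀ (n : Int) (m : Int), Dom_colocar_guardias n m → Spec_colocar_guardias n m (colocar_guardias n m)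

-- ===== LEMMAS AND PROOFS =====

-- the cell value of the grid after the greedy has finished rows < f and,
-- within row f, columns < c
def cellVal (f c i j : Int) : Bool :=
  if i < f ∧ i % 2 = 0 then decide (j % 2 = 0)
  else if i = f then decide (j % 2 = 0 ∧ j < c) else false

def gridP (N M f c : Int) : List (List Bool) :=
  (PySem.List.pyRange 0 N 1).map
    (fun i => (PySem.List.pyRange 0 M 1).map (fun j => cellVal f c i j))

lemma gridP_congr {N M f c f' c' : Int}
    (h : ∀ i j : Int, 0 ≤ i → i < N → 0 ≤ j → j < M → cellVal f c i j = cellVal f' c' i j) :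
    gridP N M f c = gridP N M f' c' := by
  unfold gridP
  refine List.map_congr_left (fun i hi => ?_)
  refine List.map_congr_left (fun j hj => ?_)
  rw [PySem.List.mem_pyRange_one] at hi hj
  exact h i j hi.1 hi.2 hj.1 hj.2

lemma cell_gridP {N M f c i j : Int} (hi0 : 0 ≤ i) (hiN : i < N) (hj0 : 0 ≤ j) (hjM : j < M) :
    cgCell (gridP N M f c) i j = cellVal f c i j := by
  unfold cgCell gridP
  rw [PySem.List.pyGetD_map_pyRange_of_nonneg _ _ _ _ hi0 hiN,
      PySem.List.pyGetD_map_pyRange_of_nonneg _ _ _ _ hj0 hjM]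

lemma length_gridP (N M f c : Int) : (gridP N M f c).length = (N).toNat := by
  simp [gridP, PySem.List.length_pyRange_one]

lemma row_gridP {N M f c i : Int} (hi0 : 0 ≤ i) (hiN : i < N) :
    PySem.List.pyGetD (gridP N M f c) i [] =
      (PySem.List.pyRange 0 M 1).map (fun j => cellVal f c i j) := by
  unfold gridP
  rw [PySem.List.pyGetD_map_pyRange_of_nonneg _ _ _ _ hi0 hiN]

lemma rowlen_gridP {N M f c i : Int} (hi0 : 0 ≤ i) (hiN : i < N) :
    ((PySem.List.pyGetD (gridP N M f c) i []).length : Int) = M.toNat := by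
  rw [row_gridP hi0 hiN]; simp [PySem.List.length_pyRange_one]

lemma set_map_pyRange {α : Type} (g : Int → α) {N k : Int} (hk0 : 0 ≤ k) (_hkN : k < N)
    (v : α) :
    ((PySem.List.pyRange 0 N 1).map g).set k.toNat v
      = (PySem.List.pyRange 0 N 1).map (fun i => if i = k then v else g i) := by
  apply List.ext_getElem
  · simp
  · intro idx h1 h2
    rw [List.getElem_set, List.getElem_map, List.getElem_map,
        PySem.List.getElem_pyRange_one]
    by_cases he : k.toNat = idx
    · rw [if_pos he, if_pos (by omega)]
    · rw [if_neg he, if_neg (by omega)]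

-- writing True at (f, c) advances the partial pattern by one column (c even)
lemma write_gridP {N M f c : Int} (hf0 : 0 ≤ f) (hfN : f < N) (hc0 : 0 ≤ c) (hcM : c < M)
    (hce : c % 2 = 0) :
    PySem.List.pySetD (gridP N M f c) f
        (PySem.List.pySetD (PySem.List.pyGetD (gridP N M f c) f []) c true) =
      gridP N M f (c + 1) := by
  rw [row_gridP hf0 hfN, PySem.List.pySetD_of_nonneg _ _ hc0,
      PySem.List.pySetD_of_nonneg _ _ hf0,
      set_map_pyRange _ hc0 hcM]
  unfold gridP
  rw [set_map_pyRange _ hf0 hfN]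
  refine List.map_congr_left (fun i hi => ?_)
  rw [PySem.List.mem_pyRange_one] at hi
  by_cases hif : i = f
  · subst hif
    rw [if_pos rfl]
    refine List.map_congr_left (fun j hj => ?_)
    rw [PySem.List.mem_pyRange_one] at hj
    by_cases hjc : j = c
    · subst hjc
      rw [if_pos rfl]
      simp only [cellVal]
      rw [if_neg (by omega : ¬(i < i ∧ i % 2 = 0)), if_true]
      exact (decide_eq_true (by omega : j % 2 = 0 ∧ j < j + 1)).symm
    · rw [if_neg hjc]
      simp only [cellVal, if_true]
      have hni : ¬(i < i ∧ i % 2 = 0) := by omega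
      rw [if_neg hni, if_neg hni, decide_eq_decide]
      omega
  · rw [if_neg hif]
    refine List.map_congr_left (fun j hj => ?_)
    simp only [cellVal]
    by_cases h1 : i < f ∧ i % 2 = 0
    · rw [if_pos h1, if_pos h1]
    · rw [if_neg h1, if_neg h1, if_neg hif, if_neg hif]

-- for odd c nothing changes between c and c+1
lemma gridP_succ_odd {N M f c : Int} (hco : c % 2 = 1) :
    gridP N M f (c + 1) = gridP N M f c := by
  refine gridP_congr (fun i j _ _ _ _ => ?_)
  simp only [cellVal]
  by_cases h1 : i < f ∧ i % 2 = 0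
  · rw [if_pos h1, if_pos h1]
  · rw [if_neg h1, if_neg h1]
    by_cases h2 : i = f
    · rw [if_pos h2, if_pos h2, decide_eq_decide]; omega
    · rw [if_neg h2, if_neg h2]

-- end of an even row f: grid = start of row f+1
lemma gridP_row_succ_even {N M f : Int} (hfe : f % 2 = 0) :
    gridP N M f M = gridP N M (f + 1) 0 := by
  refine gridP_congr (fun i j hi0 hiN hj0 hjM => ?_)
  simp only [cellVal]
  by_cases h1 : i < f ∧ i % 2 = 0
  · rw [if_pos h1, if_pos (by omega : i < f + 1 ∧ i % 2 = 0)]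
  · rw [if_neg h1]
    by_cases h2 : i = f
    · rw [if_pos h2, if_pos (by omega : i < f + 1 ∧ i % 2 = 0), decide_eq_decide]
      omega
    · rw [if_neg h2, if_neg (by omega : ¬(i < f + 1 ∧ i % 2 = 0))]
      by_cases h3 : i = f + 1
      · rw [if_pos h3]
        exact (decide_eq_false (by omega : ¬(j % 2 = 0 ∧ j < 0))).symm
      · rw [if_neg h3]

-- an odd row places nothing: grid at start of row f+1 = at start of row f
lemma gridP_row_succ_odd {N M f : Int} (hfo : f % 2 = 1) :
    gridP N M f 0 = gridP N M (f + 1) 0 := by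
  refine gridP_congr (fun i j hi0 hiN hj0 hjM => ?_)
  simp only [cellVal]
  by_cases h1 : i < f ∧ i % 2 = 0
  · rw [if_pos h1, if_pos (by omega : i < f + 1 ∧ i % 2 = 0)]
  · rw [if_neg h1, if_neg (by omega : ¬(i < f + 1 ∧ i % 2 = 0))]
    by_cases h2 : i = f
    · rw [if_pos h2, if_neg (by omega : ¬ i = f + 1)]
      simp only [decide_eq_false_iff_not]
      omega
    · rw [if_neg h2]
      by_cases h3 : i = f + 1
      · rw [if_pos h3]
        exact (decide_eq_false (by omega : ¬(j % 2 = 0 ∧ j < 0))).symm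
      · rw [if_neg h3]

lemma step_even {N M f c : Int} (hf0 : 0 ≤ f) (hfN : f < N) (hfe : f % 2 = 0)
    (hc0 : 0 ≤ c) (hcM : c < M) (acc : List (Int × Int)) :
    cgStep (gridP N M f c, acc) f c =
      if c % 2 = 0 then (gridP N M f (c + 1), acc ++ [(f, c)]) else (gridP N M f c, acc) := by
  have hN0 : (0:Int) < N := by omega
  have hM0 : (0:Int) < M := by omega
  simp only [cgStep]
  rw [length_gridP, rowlen_gridP (le_refl 0) hN0,
      Int.toNat_of_nonneg (by omega : (0:Int) ≤ N),
      Int.toNat_of_nonneg (by omega : (0:Int) ≤ M)]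
  have h1 : (if f > 0 then cgCell (gridP N M f c) (f - 1) c else false) = false := by
    by_cases h : f > 0
    · rw [if_pos h, cell_gridP (by omega) (by omega) hc0 hcM]
      simp only [cellVal]
      rw [if_neg (by omega : ¬(f - 1 < f ∧ (f - 1) % 2 = 0)), if_neg (by omega : ¬f - 1 = f)]
    · rw [if_neg h]
  have h2 : (if f > 0 ∧ c > 0 then cgCell (gridP N M f c) (f - 1) (c - 1) else false) = false := by
    by_cases h : f > 0 ∧ c > 0
    · rw [if_pos h, cell_gridP (by omega) (by omega) (by omega) (by omega)]
      simp only [cellVal]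
      rw [if_neg (by omega : ¬(f - 1 < f ∧ (f - 1) % 2 = 0)), if_neg (by omega : ¬f - 1 = f)]
    · rw [if_neg h]
  have h3 : (if f > 0 ∧ c < M - 1 then cgCell (gridP N M f c) (f - 1) (c + 1) else false) = false := by
    by_cases h : f > 0 ∧ c < M - 1
    · rw [if_pos h, cell_gridP (by omega) (by omega) (by omega) (by omega)]
      simp only [cellVal]
      rw [if_neg (by omega : ¬(f - 1 < f ∧ (f - 1) % 2 = 0)), if_neg (by omega : ¬f - 1 = f)]
    · rw [if_neg h]
  have h5 : (if c < M - 1 then cgCell (gridP N M f c) f (c + 1) else false) = false := by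
    by_cases h : c < M - 1
    · rw [if_pos h, cell_gridP hf0 hfN (by omega) (by omega)]
      simp only [cellVal]
      rw [if_neg (by omega : ¬(f < f ∧ f % 2 = 0)), if_true]
      exact decide_eq_false (by omega)
    · rw [if_neg h]
  have h6 : (if f < N - 1 then cgCell (gridP N M f c) (f + 1) c else false) = false := by
    by_cases h : f < N - 1
    · rw [if_pos h, cell_gridP (by omega) (by omega) hc0 hcM]
      simp only [cellVal]
      rw [if_neg (by omega : ¬(f + 1 < f ∧ (f + 1) % 2 = 0)), if_neg (by omega : ¬f + 1 = f)]
    · rw [if_neg h]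
  have h7 : (if f < N - 1 ∧ c > 0 then cgCell (gridP N M f c) (f + 1) (c - 1) else false) = false := by
    by_cases h : f < N - 1 ∧ c > 0
    · rw [if_pos h, cell_gridP (by omega) (by omega) (by omega) (by omega)]
      simp only [cellVal]
      rw [if_neg (by omega : ¬(f + 1 < f ∧ (f + 1) % 2 = 0)), if_neg (by omega : ¬f + 1 = f)]
    · rw [if_neg h]
  have h8 : (if f < N - 1 ∧ c < M - 1 then cgCell (gridP N M f c) (f + 1) (c + 1) else false) = false := by
    by_cases h : f < N - 1 ∧ c < M - 1
    · rw [if_pos h, cell_gridP (by omega) (by omega) (by omega) (by omega)]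
      simp only [cellVal]
      rw [if_neg (by omega : ¬(f + 1 < f ∧ (f + 1) % 2 = 0)), if_neg (by omega : ¬f + 1 = f)]
    · rw [if_neg h]
  rcases (by omega : c % 2 = 0 ∨ c % 2 = 1) with hpar | hpar
  · have h4 : (if c > 0 then cgCell (gridP N M f c) f (c - 1) else false) = false := by
      by_cases h : c > 0
      · rw [if_pos h, cell_gridP hf0 hfN (by omega) (by omega)]
        simp only [cellVal]
        rw [if_neg (by omega : ¬(f < f ∧ f % 2 = 0)), if_true]
        exact decide_eq_false (by omega)
      · rw [if_neg h]
    rw [h1, h2, h3, h4, h5, h6, h7, h8]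
    simp only [Bool.or_self]
    rw [if_neg (by simp : ¬(false = true)),
        write_gridP hf0 hfN hc0 hcM hpar, if_pos hpar]
  · have h4 : (if c > 0 then cgCell (gridP N M f c) f (c - 1) else false) = true := by
      rw [if_pos (by omega : c > 0), cell_gridP hf0 hfN (by omega) (by omega)]
      simp only [cellVal]
      rw [if_neg (by omega : ¬(f < f ∧ f % 2 = 0)), if_true]
      exact decide_eq_true (by omega)
    rw [h1, h2, h3, h4]
    simp only [Bool.false_or, Bool.true_or]
    rw [if_true, if_neg (by omega : ¬c % 2 = 0)]

lemma step_odd {N M f c : Int} (hf0 : 0 ≤ f) (hfN : f < N) (hfo : f % 2 = 1)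
    (hc0 : 0 ≤ c) (hcM : c < M) (acc : List (Int × Int)) :
    cgStep (gridP N M f 0, acc) f c = (gridP N M f 0, acc) := by
  have hN0 : (0:Int) < N := by omega
  have hM0 : (0:Int) < M := by omega
  simp only [cgStep]
  rw [length_gridP, rowlen_gridP (le_refl 0) hN0,
      Int.toNat_of_nonneg (by omega : (0:Int) ≤ N),
      Int.toNat_of_nonneg (by omega : (0:Int) ≤ M)]
  rcases (by omega : c % 2 = 0 ∨ c % 2 = 1) with hpar | hpar
  · have h1 : (if f > 0 then cgCell (gridP N M f 0) (f - 1) c else false) = true := by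
      rw [if_pos (by omega : f > 0), cell_gridP (by omega) (by omega) hc0 hcM]
      simp only [cellVal]
      rw [if_pos (by omega : f - 1 < f ∧ (f - 1) % 2 = 0)]
      exact decide_eq_true hpar
    rw [h1]
    simp only [Bool.true_or]
    rw [if_true]
  · have h1 : (if f > 0 then cgCell (gridP N M f 0) (f - 1) c else false) = false := by
      rw [if_pos (by omega : f > 0), cell_gridP (by omega) (by omega) hc0 hcM]
      simp only [cellVal]
      rw [if_pos (by omega : f - 1 < f ∧ (f - 1) % 2 = 0)]
      exact decide_eq_false (by omega)
    have h2 : (if f > 0 ∧ c > 0 then cgCell (gridP N M f 0) (f - 1) (c - 1) else false) = true := by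
      rw [if_pos (by omega : f > 0 ∧ c > 0), cell_gridP (by omega) (by omega) (by omega) (by omega)]
      simp only [cellVal]
      rw [if_pos (by omega : f - 1 < f ∧ (f - 1) % 2 = 0)]
      exact decide_eq_true (by omega)
    rw [h1, h2]
    simp only [Bool.false_or, Bool.true_or]
    rw [if_true]

lemma pyRange_cast_toNat (k : Int) :
    PySem.List.pyRange 0 ((k.toNat : Nat) : Int) 1 = PySem.List.pyRange 0 k 1 := by
  rcases (by omega : k ≤ 0 ∨ 0 < k) with hk | hk
  · rw [PySem.List.pyRange_one_eq_nil (by omega : k ≤ 0),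
        PySem.List.pyRange_one_eq_nil (by omega : ((k.toNat : Nat) : Int) ≤ 0)]
  · rw [Int.toNat_of_nonneg (by omega : (0:Int) ≤ k)]

lemma pyRange_two_filter_nat (nn : Nat) :
    PySem.List.pyRange 0 (nn : Int) 2
      = (PySem.List.pyRange 0 (nn : Int) 1).filter (fun x => x % 2 = 0) := by
  induction nn with
  | zero =>
    rw [PySem.List.pyRange_one_eq_nil (by omega), List.filter_nil,
        PySem.List.pyRange_of_pos _ _ (by omega : (0:Int) < 2),
        if_neg (by omega : ¬(0:Int) < ((0:Nat) : Int))]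
    rfl
  | succ n ih =>
    rw [show (((n + 1 : Nat)) : Int) = (n : Int) + 1 from by push_cast; ring,
        PySem.List.pyRange_one_succ_right (by omega : (0:Int) ≤ (n : Int)),
        List.filter_append, ← ih,
        PySem.List.pyRange_of_pos _ _ (by omega : (0:Int) < 2),
        PySem.List.pyRange_of_pos _ _ (by omega : (0:Int) < 2),
        if_pos (by omega : (0:Int) < (n : Int) + 1)]
    have e1 : (((n : Int) + 1 - 0 + 2 - 1) / 2).toNat = (n + 2) / 2 := by omega
    rw [e1]
    rcases (by omega : n % 2 = 0 ∨ n % 2 = 1) with hp | hp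
    · have e2 : (if (0:Int) < (n : Int) then (((n : Int) - 0 + 2 - 1) / 2).toNat else 0)
          = n / 2 := by
        split_ifs <;> omega
      rw [e2, show (n + 2) / 2 = n / 2 + 1 from by omega, List.range_succ,
          List.map_append]
      have e3 : List.filter (fun x => decide (x % 2 = 0)) [(n : Int)] = [(n : Int)] := by
        simp [show (2:Int) ∣ (n : Int) from by omega]
      rw [e3]
      congr 1
      simp only [List.map_cons, List.map_nil]
      congr 1
      omega
    · have e2 : (if (0:Int) < (n : Int) then (((n : Int) - 0 + 2 - 1) / 2).toNat else 0)
          = (n + 1) / 2 := by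
        split_ifs <;> omega
      rw [e2, show (n + 2) / 2 = (n + 1) / 2 from by omega]
      have e3 : List.filter (fun x => decide (x % 2 = 0)) [(n : Int)] = [] := by
        simp [show ¬(2:Int) ∣ (n : Int) from by omega]
      rw [e3, List.append_nil]

lemma inner_even {N M f : Int} (hf0 : 0 ≤ f) (hfN : f < N) (hfe : f % 2 = 0) :
    ∀ (k : Nat) (c : Int), (M - c).toNat = k → 0 ≤ c → ∀ acc,
      (PySem.List.pyRange c M 1).foldl (fun st col => cgStep st f col) (gridP N M f c, acc) =
        (gridP N M f M,
         acc ++ ((PySem.List.pyRange c M 1).filter (fun j => j % 2 = 0)).map (fun j => (f, j))) := by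
  intro k
  induction k with
  | zero =>
    intro c hk hc0 acc
    rw [PySem.List.pyRange_one_eq_nil (by omega : M ≤ c)]
    simp only [List.foldl_nil, List.filter_nil, List.map_nil, List.append_nil]
    have hg : gridP N M f c = gridP N M f M := by
      refine gridP_congr (fun i j hi0 hiN hj0 hjM => ?_)
      simp only [cellVal]
      by_cases h1 : i < f ∧ i % 2 = 0
      · rw [if_pos h1, if_pos h1]
      · rw [if_neg h1, if_neg h1]
        by_cases h2 : i = f
        · rw [if_pos h2, if_pos h2, decide_eq_decide]; omega
        · rw [if_neg h2, if_neg h2]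
    rw [hg]
  | succ k ih =>
    intro c hk hc0 acc
    have hcM : c < M := by omega
    rw [PySem.List.pyRange_one_cons hcM, List.foldl_cons,
        step_even hf0 hfN hfe hc0 hcM acc]
    rcases (by omega : c % 2 = 0 ∨ c % 2 = 1) with hpar | hpar
    · rw [if_pos hpar, ih (c + 1) (by omega) (by omega) (acc ++ [(f, c)])]
      simp [show (2:Int) ∣ c from by omega]
    · rw [if_neg (by omega : ¬c % 2 = 0),
          show gridP N M f c = gridP N M f (c + 1) from (gridP_succ_odd hpar).symm,
          ih (c + 1) (by omega) (by omega) acc]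
      simp [show ¬(2:Int) ∣ c from by omega]

lemma inner_odd {N M f : Int} (hf0 : 0 ≤ f) (hfN : f < N) (hfo : f % 2 = 1) :
    ∀ (k : Nat) (c : Int), (M - c).toNat = k → 0 ≤ c → ∀ acc,
      (PySem.List.pyRange c M 1).foldl (fun st col => cgStep st f col) (gridP N M f 0, acc) =
        (gridP N M f 0, acc) := by
  intro k
  induction k with
  | zero =>
    intro c hk hc0 acc
    rw [PySem.List.pyRange_one_eq_nil (by omega : M ≤ c)]
    rfl
  | succ k ih =>
    intro c hk hc0 acc
    rw [PySem.List.pyRange_one_cons (by omega : c < M), List.foldl_cons,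
        step_odd hf0 hfN hfo hc0 (by omega) acc]
    exact ih (c + 1) (by omega) (by omega) acc

-- grid rows of gridP at column 0 are all-false up to row f... the OUTER loop invariant
lemma outer {N M : Int} :
    ∀ (k : Nat) (f : Int), (N - f).toNat = k → 0 ≤ f → ∀ acc,
      (PySem.List.pyRange f N 1).foldl
        (fun st fil =>
          (PySem.List.pyRange 0 ((PySem.List.pyGetD st.1 0 []).length : Int) 1).foldl
            (fun st2 col => cgStep st2 fil col) st)
        (gridP N M f 0, acc) =
      (gridP N M N 0,
       acc ++ ((PySem.List.pyRange f N 1).filter (fun i => i % 2 = 0)).flatMap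
         (fun i => ((PySem.List.pyRange 0 M 1).filter (fun j => j % 2 = 0)).map (fun j => (i, j)))) := by
  intro k
  induction k with
  | zero =>
    intro f hk hf0 acc
    rw [PySem.List.pyRange_one_eq_nil (by omega : N ≤ f)]
    simp only [List.foldl_nil, List.filter_nil, List.flatMap_nil, List.append_nil]
    have hg : gridP N M f 0 = gridP N M N 0 := by
      refine gridP_congr (fun i j hi0 hiN hj0 hjM => ?_)
      simp only [cellVal]
      by_cases h1 : i < f ∧ i % 2 = 0
      · rw [if_pos h1, if_pos (by omega : i < N ∧ i % 2 = 0)]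
      · rw [if_neg h1, if_neg (by omega : ¬(i < N ∧ i % 2 = 0)),
            if_neg (by omega : ¬i = f), if_neg (by omega : ¬i = N)]
    rw [hg]
  | succ k ih =>
    intro f hk hf0 acc
    have hfN : f < N := by omega
    rw [PySem.List.pyRange_one_cons hfN]
    simp only [List.foldl_cons]
    rw [rowlen_gridP (le_refl 0) (by omega : (0:Int) < N), pyRange_cast_toNat M]
    rcases (by omega : f % 2 = 0 ∨ f % 2 = 1) with hpar | hpar
    · rw [inner_even hf0 hfN hpar (M - 0).toNat 0 rfl le_rfl acc,
          gridP_row_succ_even hpar,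
          ih (f + 1) (by omega) (by omega) _]
      simp [show (2:Int) ∣ f from by omega]
    · rw [inner_odd hf0 hfN hpar (M - 0).toNat 0 rfl le_rfl acc,
          gridP_row_succ_odd hpar,
          ih (f + 1) (by omega) (by omega) acc]
      simp [show ¬(2:Int) ∣ f from by omega]

-- range(0, k, 2) is the even elements of range(0, k)
lemma pyRange_two_filter (k : Int) :
    PySem.List.pyRange 0 k 2 = (PySem.List.pyRange 0 k 1).filter (fun x => x % 2 = 0) := by
  rcases (by omega : k ≤ 0 ∨ 0 < k) with hk | hk
  · rw [PySem.List.pyRange_one_eq_nil hk, List.filter_nil,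
        PySem.List.pyRange_of_pos _ _ (by omega : (0:Int) < 2),
        if_neg (by omega : ¬(0:Int) < k)]
    rfl
  · rw [show k = ((k.toNat : Nat) : Int) from by omega]
    exact pyRange_two_filter_nat k.toNat

-- the initial grid is gridP at (0,0)
lemma init_grid (n m : Int) :
    (PySem.List.pyRange 0 n 1).map (fun _ => List.replicate m.toNat false) = gridP n m 0 0 := by
  unfold gridP
  refine List.map_congr_left (fun i hi => ?_)
  rw [PySem.List.mem_pyRange_one] at hi
  apply List.ext_getElem
  · simp [PySem.List.length_pyRange_one]
  · intro idx h1 h2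
    rw [List.getElem_replicate, List.getElem_map, PySem.List.getElem_pyRange_one]
    simp only [cellVal]
    by_cases h0 : i = 0
    · rw [if_neg (by omega : ¬(i < 0 ∧ i % 2 = 0)), if_pos h0]
      exact (decide_eq_false (by omega : ¬((0 + (idx : Int)) % 2 = 0 ∧ 0 + (idx : Int) < 0))).symm
    · rw [if_neg (by omega : ¬(i < 0 ∧ i % 2 = 0)), if_neg h0]

-- ===== VERDICT (by name: the statement is the Claim_ definition above) =====
theorem colocar_guardias_spec : Claim_equal_colocar_guardias := by
  unfold Claim_equal_colocar_guardias
  intro n m _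
  unfold Spec_colocar_guardias
  simp only [colocar_guardias, colocar_guardias_alt]
  rw [init_grid n m, length_gridP, pyRange_cast_toNat n,
      outer (n - 0).toNat 0 rfl le_rfl []]
  simp only [List.nil_append]
  rw [pyRange_two_filter n, pyRange_two_filter m]
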